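-- pv_equiv track=rewrite | github.com/floriciolacu/StarGAN-Music-Genre-Transfer | main.py | get_styles
-- ===== SOURCE A (Python) =====
-- def get_styles(dataset_train: str, styles = []):
--     if '_' in dataset_train:
--         dataset_train = dataset_train.rsplit('_', maxsplit=1)
--         styles.append(dataset_train[1])
--         get_styles(dataset_train[0],styles)
--     else:
--         styles.append(dataset_train.rsplit('/', maxsplit=1)[1])
--     return list(reversed(styles))
-- ===== SOURCE B (Python) =====
-- # Same mutable-default behaviour as A: styles is appended to in place, in the same order.
-- def get_styles(dataset_train: str, styles = []):
--     parts = dataset_train.split('_')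
--     for tok in reversed(parts[1:]):
--         styles.append(tok)
--     styles.append(parts[0].rsplit('/', maxsplit=1)[1])
--     return list(reversed(styles))
-- ===== Notes on version B (the rewrite author's own statement) =====
-- stated objective: simpler
-- what changed: Replaced A's recursive chain of rsplit('_', maxsplit=1) calls by one flat split('_') followed by a simple append loop and a single basename extraction.
import Mathlib
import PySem

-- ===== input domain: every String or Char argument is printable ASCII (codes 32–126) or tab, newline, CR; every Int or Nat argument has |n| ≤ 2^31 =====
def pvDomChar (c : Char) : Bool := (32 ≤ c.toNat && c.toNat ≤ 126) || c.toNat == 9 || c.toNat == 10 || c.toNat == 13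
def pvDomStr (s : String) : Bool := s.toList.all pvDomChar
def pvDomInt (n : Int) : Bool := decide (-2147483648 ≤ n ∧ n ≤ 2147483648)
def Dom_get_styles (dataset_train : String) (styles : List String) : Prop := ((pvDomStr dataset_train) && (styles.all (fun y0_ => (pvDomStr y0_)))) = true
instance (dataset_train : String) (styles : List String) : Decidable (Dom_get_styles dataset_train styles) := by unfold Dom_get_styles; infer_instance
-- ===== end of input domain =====

-- B replaces A's recursive chain of rsplit('_', 1) calls by one flat split('_') plus a loop
-- (objective: simpler). Both Pythons append to the caller's `styles` list in place in the
-- same order; the equivalence proved here is about the RETURN value (the mutation is identical).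

-- ===== PORT A =====
-- Hand port (PySem has no rsplit with maxsplit): s.rsplit(sep, maxsplit=1) as
-- some (before, after) split at the LAST occurrence of sep, none when sep is absent.
-- Exact: scanning from the left, the rightmost occurrence wins.
def pvRsplit1 (cs : List Char) (sep : Char) : Option (List Char × List Char) :=
  match cs with
  | [] => none
  | c :: rest =>
    match pvRsplit1 rest sep with
    | some (a, b) => some (c :: a, b)
    | none => if c = sep then some ([], rest) else none

-- s.rsplit('/', maxsplit=1)[1]; Python raises IndexError when '/' is absent (excluded by Pre_)
def pvBasename (cs : List Char) : List Char :=
  match pvRsplit1 cs '/' with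
  | some (_, b) => b
  | none => []

-- termination of A's recursion: the left piece of an rsplit is strictly shorter
theorem pvRsplit1_fst_length (cs : List Char) (sep : Char) (a b : List Char)
    (h : pvRsplit1 cs sep = some (a, b)) : a.length < cs.length := by
  induction cs generalizing a b with
  | nil => simp [pvRsplit1] at h
  | cons c rest ih =>
    simp only [pvRsplit1] at h
    cases hr : pvRsplit1 rest sep with
    | some p =>
      obtain ⟨a', b'⟩ := p
      rw [hr] at h
      dsimp only at h
      simp only [Option.some.injEq, Prod.mk.injEq] at h
      obtain ⟨h1, h2⟩ := h
      have := ih a' b' hr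
      simp only [← h1, List.length_cons]
      omega
    | none =>
      rw [hr] at h
      dsimp only at h
      by_cases hc : c = sep
      · rw [if_pos hc] at h
        simp only [Option.some.injEq, Prod.mk.injEq] at h
        simp [← h.1]
      · rw [if_neg hc] at h
        simp at h

-- A's recursion: each step appends the piece after the last '_' and recurses on the piece
-- before it (Python mutates `styles`; modelled by threading the list); the top-level
-- `return list(reversed(styles))` is applied to the final list in `get_styles` below.
def get_styles_core (cs : List Char) (styles : List (List Char)) : List (List Char) :=
  match h : pvRsplit1 cs '_' with
  | some (a, b) => get_styles_core a (styles ++ [b])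
  | none => styles ++ [pvBasename cs]
termination_by cs.length
decreasing_by exact pvRsplit1_fst_length cs '_' a b h

def get_styles (dataset_train : String) (styles : List String) : List String :=
  ((get_styles_core dataset_train.toList (styles.map String.toList)).reverse).map String.ofList

-- ===== PORT B =====
def get_styles_alt (dataset_train : String) (styles : List String) : List String :=
  let parts := PySem.Chars.splitOn dataset_train.toList ['_']
  -- for tok in reversed(parts[1:]): styles.append(tok)
  let styles1 := ((parts.drop 1).reverse).foldl (fun acc t => acc ++ [t]) (styles.map String.toList)
  -- styles.append(parts[0].rsplit('/', maxsplit=1)[1])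
  let styles2 := styles1 ++ [pvBasename (parts.headD [])]
  (styles2.reverse).map String.ofList

-- ===== PRECONDITION & SPEC =====
-- A (and B) raise IndexError exactly when the chunk before the first '_' contains no '/'.
def Pre_get_styles (dataset_train : String) (styles : List String) : Prop :=
  PySem.Chars.isIn ['/'] ((PySem.Chars.splitOn dataset_train.toList ['_']).headD []) = true
instance (dataset_train : String) (styles : List String) : Decidable (Pre_get_styles dataset_train styles) := by unfold Pre_get_styles; infer_instance

def pvWitness_get_styles : String × List String := ("data/jazz_rock", ["pop"])

def Spec_get_styles (dataset_train : String) (styles : List String) (out : List String) : Prop := out = get_styles_alt dataset_train styles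
instance (dataset_train : String) (styles : List String) (out : List String) : Decidable (Spec_get_styles dataset_train styles out) := by unfold Spec_get_styles; infer_instance

-- ===== CLAIM (what is proved, stated in full; the proofs are below) =====
def Claim_equal_get_styles : Prop := ∀ (dataset_train : String) (styles : List String), Dom_get_styles dataset_train styles → Pre_get_styles dataset_train styles → Spec_get_styles dataset_train styles (get_styles dataset_train styles)

-- ===== LEMMAS AND PROOFS =====

-- structural reference version of str.split('_') used only in the proofs
def mySplit : List Char → List (List Char)
  | [] => [[]]
  | c :: rest =>
    if c = '_' then [] :: mySplit rest
    else
      match mySplit rest with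
      | p :: ps => (c :: p) :: ps
      | [] => [[c]]

theorem mySplit_ne_nil (cs : List Char) : mySplit cs ≠ [] := by
  cases cs with
  | nil => simp [mySplit]
  | cons c rest =>
    simp only [mySplit]
    split_ifs
    · simp
    · cases h : mySplit rest <;> simp

theorem splitOn_go_eq (l : List Char) (fuel : Nat) (cur : List Char) (acc : List (List Char))
    (hf : l.length < fuel) :
    PySem.Chars.splitOn.go ['_'] fuel l cur acc
      = acc.reverse ++ (mySplit l).modifyHead (cur.reverse ++ ·) := by
  induction l generalizing fuel cur acc with
  | nil =>
    cases fuel with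
    | zero => omega
    | succ f => simp [PySem.Chars.splitOn.go, mySplit]
  | cons c rest ih =>
    cases fuel with
    | zero => omega
    | succ f =>
      rw [PySem.Chars.splitOn.go]
      by_cases hc : c = '_'
      · subst hc
        have : List.isPrefixOf ['_'] ('_' :: rest) = true := by simp [List.isPrefixOf]
        rw [this]
        simp only [if_true]
        simp only [List.length_cons, List.length_nil, List.drop_succ_cons, List.drop_zero]
        rw [ih f [] (List.reverse cur :: acc) (by simp at hf; omega)]
        simp [mySplit]
        cases mySplit rest <;> simp
      · have : List.isPrefixOf ['_'] (c :: rest) = false := by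
          simp [List.isPrefixOf]
          exact fun h => absurd h.symm hc
        rw [this]
        simp only [Bool.false_eq_true, if_false]
        rw [ih f (c :: cur) acc (Nat.lt_of_succ_lt_succ hf)]
        simp only [mySplit, if_neg hc]
        cases h : mySplit rest with
        | nil => exact absurd h (mySplit_ne_nil rest)
        | cons p ps => simp

theorem splitOn_eq_mySplit (cs : List Char) :
    PySem.Chars.splitOn cs ['_'] = mySplit cs := by
  have := splitOn_go_eq cs (cs.length + 1) [] [] (by omega)
  rw [PySem.Chars.splitOn, this]
  simp
  cases h : mySplit cs with
  | nil => exact absurd h (mySplit_ne_nil cs)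
  | cons p ps => simp

theorem mySplit_no_sep (b : List Char) (hb : '_' ∉ b) : mySplit b = [b] := by
  induction b with
  | nil => simp [mySplit]
  | cons c rest ih =>
    simp only [List.mem_cons, not_or] at hb
    have hc : ¬ c = '_' := Ne.symm hb.1
    simp [mySplit, if_neg hc, ih hb.2]

theorem mySplit_append (a b : List Char) (hb : '_' ∉ b) :
    mySplit (a ++ '_' :: b) = mySplit a ++ [b] := by
  induction a with
  | nil => simp [mySplit, mySplit_no_sep b hb]
  | cons c a' ih =>
    by_cases hc : c = '_'
    · subst hc; simp [mySplit, ih]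
    · simp only [List.cons_append, mySplit, if_neg hc, ih]
      cases h : mySplit a' with
      | nil => exact absurd h (mySplit_ne_nil a')
      | cons p ps => simp

theorem pvRsplit1_none (cs : List Char) (sep : Char) (h : pvRsplit1 cs sep = none) :
    sep ∉ cs := by
  induction cs with
  | nil => simp
  | cons c rest ih =>
    simp only [pvRsplit1] at h
    cases hr : pvRsplit1 rest sep with
    | some p => rw [hr] at h; obtain ⟨a', b'⟩ := p; simp at h
    | none =>
      rw [hr] at h
      dsimp only at h
      by_cases hc : c = sep
      · rw [if_pos hc] at h; simp at h
      · simp only [List.mem_cons, not_or]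
        exact ⟨fun he => hc he.symm, ih hr⟩

theorem pvRsplit1_some (cs : List Char) (sep : Char) (a b : List Char)
    (h : pvRsplit1 cs sep = some (a, b)) : cs = a ++ sep :: b ∧ sep ∉ b := by
  induction cs generalizing a b with
  | nil => simp [pvRsplit1] at h
  | cons c rest ih =>
    simp only [pvRsplit1] at h
    cases hr : pvRsplit1 rest sep with
    | some p =>
      obtain ⟨a', b'⟩ := p
      rw [hr] at h
      dsimp only at h
      simp only [Option.some.injEq, Prod.mk.injEq] at h
      obtain ⟨h1, h2⟩ := h
      obtain ⟨he, hn⟩ := ih a' b' hr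
      subst h2
      simp [← h1, he, hn]
    | none =>
      rw [hr] at h
      dsimp only at h
      by_cases hc : c = sep
      · rw [if_pos hc] at h
        simp only [Option.some.injEq, Prod.mk.injEq] at h
        obtain ⟨h1, h2⟩ := h
        subst hc h2
        refine ⟨by simp [← h1], pvRsplit1_none rest _ hr⟩
      · rw [if_neg hc] at h
        simp at h

theorem core_eq (cs : List Char) (styles : List (List Char)) :
    get_styles_core cs styles
      = styles ++ ((mySplit cs).drop 1).reverse ++ [pvBasename ((mySplit cs).headD [])] := by
  fun_induction get_styles_core cs styles with
  | case1 cs styles a b h ih =>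
    obtain ⟨he, hn⟩ := pvRsplit1_some cs '_' a b h
    subst he
    rw [ih, mySplit_append a b hn]
    have hne := mySplit_ne_nil a
    cases hm : mySplit a with
    | nil => exact absurd hm hne
    | cons p ps => simp
  | case2 cs styles h =>
    have hn : '_' ∉ cs := pvRsplit1_none cs '_' h
    rw [mySplit_no_sep cs hn]
    simp

-- ===== VERDICT (by name: the statement is the Claim_ definition above) =====
theorem get_styles_spec : Claim_equal_get_styles := by
  intro dataset_train styles _ _
  unfold Spec_get_styles get_styles get_styles_alt
  simp only [core_eq, splitOn_eq_mySplit, PySem.List.foldl_append_singleton]
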